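-- pv_equiv track=rewrite | github.com/kragen-w/Algorithm-Performance-Comparison | wild_project2_algorithims.py | alg1
-- ===== SOURCE A (Python) =====
-- def alg1(list)->bool:
--     """
--         this function tries to find a negative match to an existing number in the input list by iterating through
--         every value in the list, and checking the entire list for a negative match. Its complexity is O(n^2).
--         perameters: list: list[int]
--         return: bool
--         """
--     for i in range(len(list)):
--         current_element = list[i]
--         for j in range(len(list)):
--             possible_match = list[j]
--             if possible_match == current_element * -1:
--                 return True
--     return False
-- ===== SOURCE B (Python) =====
-- def alg1(list) -> bool:
--     s = sorted(list)
--     left, right = 0, len(s) - 1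
--     while left <= right:
--         total = s[left] + s[right]
--         if total == 0:
--             return True
--         elif total < 0:
--             left += 1
--         else:
--             right -= 1
--     return False
-- ===== Notes on version B (the rewrite author's own statement) =====
-- stated objective: faster
-- what changed: Replaced the quadratic all-pairs scan by sort-then-two-pointers on a sorted copy (left/right indices converge; sum 0 means x and -x both present, left==right covers a single 0).
import Mathlib
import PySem

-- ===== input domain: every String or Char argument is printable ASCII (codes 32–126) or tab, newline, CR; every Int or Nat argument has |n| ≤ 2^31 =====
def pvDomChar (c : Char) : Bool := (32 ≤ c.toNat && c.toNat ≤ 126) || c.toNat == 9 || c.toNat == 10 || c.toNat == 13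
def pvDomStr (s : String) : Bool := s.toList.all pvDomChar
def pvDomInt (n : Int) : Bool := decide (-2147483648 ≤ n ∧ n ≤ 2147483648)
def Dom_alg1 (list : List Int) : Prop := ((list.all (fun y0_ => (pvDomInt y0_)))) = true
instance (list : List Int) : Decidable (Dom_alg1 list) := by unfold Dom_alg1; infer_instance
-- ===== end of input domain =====

-- B replaces A's quadratic all-pairs scan by sorting a fresh copy and converging two indices (faster).

-- ===== PORT A =====
-- for i in range(len(list)): for j in range(len(list)): if list[j] == list[i]*-1: return True
-- (indices from range(len(list)) are always in range, so pyGetD is exact here)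
def alg1 (list : List Int) : Bool :=
  (PySem.List.pyRange 0 list.length 1).any (fun i =>
    let current_element := PySem.List.pyGetD list i 0
    (PySem.List.pyRange 0 list.length 1).any (fun j =>
      let possible_match := PySem.List.pyGetD list j 0
      possible_match == current_element * (-1)))

-- ===== PORT B =====
-- while left <= right: total = s[left]+s[right]; 0 → True; <0 → left+1; else right-1
-- (the loop keeps 0 ≤ left ≤ right < len s, so pyGetD is exact here)
def alg1AltLoop (s : List Int) (left right : Int) : Bool :=
  if _h : left ≤ right then
    let total := PySem.List.pyGetD s left 0 + PySem.List.pyGetD s right 0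
    if total = 0 then true
    else if total < 0 then alg1AltLoop s (left + 1) right
    else alg1AltLoop s left (right - 1)
  else false
termination_by (right + 1 - left).toNat
decreasing_by all_goals omega

def alg1_alt (list : List Int) : Bool :=
  let s := PySem.List.sorted list (fun x => x) false
  alg1AltLoop s 0 ((s.length : Int) - 1)

-- ===== PRECONDITION & SPEC =====
def Spec_alg1 (list : List Int) (out : Bool) : Prop := out = alg1_alt list
instance (list : List Int) (out : Bool) : Decidable (Spec_alg1 list out) := by unfold Spec_alg1; infer_instance

-- ===== CLAIM (what is proved, stated in full; the proofs are below) =====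
def Claim_equal_alg1 : Prop := ∀ (list : List Int), Dom_alg1 list → Spec_alg1 list (alg1 list)

-- ===== LEMMAS AND PROOFS =====

-- the pair property both programs decide
def HasPair (s : List Int) (l r : Int) : Prop :=
  ∃ i j : Nat, i ≤ j ∧ j < s.length ∧ l ≤ (i : Int) ∧ (j : Int) ≤ r ∧
    s.getD i 0 + s.getD j 0 = 0

lemma sorted_mono {s : List Int} (h : s.Pairwise (· ≤ ·)) {i j : Nat}
    (hij : i ≤ j) (hj : j < s.length) : s.getD i 0 ≤ s.getD j 0 := by
  rcases Nat.lt_or_ge i j with hlt | hge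
  · have := (List.pairwise_iff_getElem.mp h) i j (by omega) hj hlt
    rwa [List.getD_eq_getElem s 0 (by omega), List.getD_eq_getElem s 0 hj]
  · have : i = j := by omega
    subst this; exact le_refl _

lemma loop_iff {s : List Int} (hs : s.Pairwise (· ≤ ·)) (l r : Int)
    (hl : 0 ≤ l) (hr : r < s.length) :
    alg1AltLoop s l r = true ↔ HasPair s l r := by
  fun_induction alg1AltLoop s l r with
  | case1 l r h total h0 =>
    simp only []
    have hln : l.toNat < s.length := by omega
    have hrn : r.toNat < s.length := by omega
    constructor
    · intro _
      refine ⟨l.toNat, r.toNat, by omega, hrn, by omega, by omega, ?_⟩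
      have hgl := PySem.List.pyGetD_eq_getElem (xs := s) (i := l) (d := 0) hl (by omega)
      have hgr := PySem.List.pyGetD_eq_getElem (xs := s) (i := r) (d := 0) (by omega) (by omega)
      rw [List.getD_eq_getElem s 0 hln, List.getD_eq_getElem s 0 hrn, ← hgl, ← hgr]
      exact h0
    · intro _; trivial
  | case2 l r h total h0 hlt ih =>
    rw [ih (by omega) hr]
    constructor
    · rintro ⟨i, j, h1, h2, h3, h4, h5⟩; exact ⟨i, j, h1, h2, by omega, h4, h5⟩
    · rintro ⟨i, j, h1, h2, h3, h4, h5⟩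
      rcases Int.lt_or_le l i with hli | hle
      · exact ⟨i, j, h1, h2, by omega, h4, h5⟩
      · exfalso
        have hieq : (i : Int) = l := by omega
        have hgl := PySem.List.pyGetD_eq_getElem (xs := s) (i := l) (d := 0) hl (by omega)
        have hgr := PySem.List.pyGetD_eq_getElem (xs := s) (i := r) (d := 0) (by omega) (by omega)
        have hjr : s.getD j 0 ≤ s.getD r.toNat 0 := sorted_mono hs (by omega) (by omega)
        have hil : s.getD i 0 = s[l.toNat] := by
          rw [List.getD_eq_getElem s 0 (by omega : i < s.length)]
          congr 1; omega
        have : total = s.getD i 0 + s.getD r.toNat 0 := by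
          simp only [total, hgl, hgr, hil]
          rw [List.getD_eq_getElem s 0 (by omega : r.toNat < s.length)]
        omega
  | case3 l r h total h0 hlt ih =>
    rw [ih hl (by omega)]
    constructor
    · rintro ⟨i, j, h1, h2, h3, h4, h5⟩; exact ⟨i, j, h1, h2, h3, by omega, h5⟩
    · rintro ⟨i, j, h1, h2, h3, h4, h5⟩
      rcases Int.lt_or_le (j : Int) r with hjr | hge
      · exact ⟨i, j, h1, h2, h3, by omega, h5⟩
      · exfalso
        have hjeq : (j : Int) = r := by omega
        have hgl := PySem.List.pyGetD_eq_getElem (xs := s) (i := l) (d := 0) hl (by omega)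
        have hgr := PySem.List.pyGetD_eq_getElem (xs := s) (i := r) (d := 0) (by omega) (by omega)
        have hli : s.getD l.toNat 0 ≤ s.getD i 0 := sorted_mono hs (by omega) (by omega)
        have hjl : s.getD j 0 = s[r.toNat] := by
          rw [List.getD_eq_getElem s 0 h2]
          congr 1; omega
        have : total = s.getD l.toNat 0 + s.getD j 0 := by
          simp only [total, hgl, hgr, hjl]
          rw [List.getD_eq_getElem s 0 (by omega : l.toNat < s.length)]
        omega
  | case4 l r h =>
    simp only [Bool.false_eq_true, false_iff]
    rintro ⟨i, j, h1, h2, h3, h4, _⟩; omega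

lemma hasPair_iff_elem (s : List Int) :
    HasPair s 0 ((s.length : Int) - 1) ↔ ∃ x ∈ s, -x ∈ s := by
  constructor
  · rintro ⟨i, j, h1, h2, _, _, h5⟩
    refine ⟨s.getD i 0, ?_, ?_⟩
    · rw [List.getD_eq_getElem s 0 (by omega)]; exact List.getElem_mem _
    · have : -s.getD i 0 = s.getD j 0 := by omega
      rw [this, List.getD_eq_getElem s 0 h2]; exact List.getElem_mem _
  · rintro ⟨x, hx, hnx⟩
    obtain ⟨p, hp, hpe⟩ := List.mem_iff_getElem.mp hx
    obtain ⟨q, hq, hqe⟩ := List.mem_iff_getElem.mp hnx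
    rcases Nat.le_total p q with hpq | hqp
    · refine ⟨p, q, hpq, hq, by omega, by omega, ?_⟩
      rw [List.getD_eq_getElem s 0 hp, List.getD_eq_getElem s 0 hq, hpe, hqe]; ring
    · refine ⟨q, p, hqp, hp, by omega, by omega, ?_⟩
      rw [List.getD_eq_getElem s 0 hq, List.getD_eq_getElem s 0 hp, hpe, hqe]; ring

lemma anyGet (l : List Int) (f : Int → Bool) :
    (PySem.List.pyRange 0 (l.length : Int) 1).any (fun i => f (PySem.List.pyGetD l i 0))
      = l.any f := by
  conv_rhs => rw [← PySem.List.map_pyGetD_pyRange_zero' l 0]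
  rw [List.any_map]
  rfl

lemma alg1_iff (l : List Int) : alg1 l = true ↔ ∃ x ∈ l, -x ∈ l := by
  have hinner : ∀ x : Int,
      (PySem.List.pyRange 0 (l.length : Int) 1).any
        (fun j => PySem.List.pyGetD l j 0 == x * (-1))
      = l.any (fun y => y == x * (-1)) :=
    fun x => anyGet l (fun y => y == x * (-1))
  have hmain : alg1 l = l.any (fun x => l.any (fun y => y == x * (-1))) := by
    unfold alg1
    simp only [hinner]
    exact anyGet l (fun x => l.any fun y => y == x * (-1))
  rw [hmain]
  simp only [List.any_eq_true, beq_iff_eq]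
  constructor
  · rintro ⟨x, hx, y, hy, hxy⟩
    exact ⟨x, hx, by rw [show -x = x * (-1) by ring, ← hxy]; exact hy⟩
  · rintro ⟨x, hx, hnx⟩
    exact ⟨x, hx, -x, hnx, by ring⟩

lemma alg1_alt_iff (l : List Int) : alg1_alt l = true ↔ ∃ x ∈ l, -x ∈ l := by
  unfold alg1_alt
  set s := PySem.List.sorted l (fun x => x) false with hs
  rw [loop_iff (by simpa using PySem.List.sorted_pairwise l (fun x => x)) 0
      ((s.length : Int) - 1) (by omega) (by omega)]
  rw [hasPair_iff_elem]
  simp only [hs, PySem.List.mem_sorted]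

-- ===== VERDICT (by name: the statement is the Claim_ definition above) =====
theorem alg1_spec : Claim_equal_alg1 := by
  intro list _
  unfold Spec_alg1
  have h1 := alg1_iff list
  have h2 := alg1_alt_iff list
  by_cases hp : ∃ x ∈ list, -x ∈ list
  · rw [h1.mpr hp, h2.mpr hp]
  · rcases Bool.eq_false_or_eq_true (alg1 list) with ha | ha <;>
      rcases Bool.eq_false_or_eq_true (alg1_alt list) with hb | hb
    · rw [ha, hb]
    · exact absurd (h1.mp ha) hp
    · exact absurd (h2.mp hb) hp
    · rw [ha, hb]
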